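-- pv_equiv track=rewrite | github.com/Morgall/LARF_BA | rolling_lookahead_dt_pulp/oct/tree.py | parents_of_nodes_to_branch_on
-- ===== SOURCE A (Python) =====
-- def parents_of_nodes_to_branch_on(go_deep_nodes: [list, dict]) -> dict:
--     """
--
--     :param go_deep_nodes:
--     :return:
--     """
--     parents_to_optimize = dict()
--     for node_ in go_deep_nodes:
--         if int(node_ / 2) not in parents_to_optimize.keys():
--             parents_to_optimize[int(node_ / 2)] = [node_]
--         else:
--             parents_to_optimize[int(node_ / 2)].append(node_)
--     return parents_to_optimize
-- ===== SOURCE B (Python) =====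
-- def parents_of_nodes_to_branch_on(go_deep_nodes):
--     keys = []
--     for n in go_deep_nodes:
--         k = int(n / 2)
--         if k not in keys:
--             keys.append(k)
--     return {k: [n for n in go_deep_nodes if int(n / 2) == k] for k in keys}
-- ===== Notes on version B (the rewrite author's own statement) =====
-- stated objective: alternative
-- what changed: B makes two passes: it first collects the distinct parent keys int(n/2) in first-occurrence order, then builds each group in one comprehension filtering the whole input per key, instead of A's single scan that appends into a growing dict.
import Mathlib
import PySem

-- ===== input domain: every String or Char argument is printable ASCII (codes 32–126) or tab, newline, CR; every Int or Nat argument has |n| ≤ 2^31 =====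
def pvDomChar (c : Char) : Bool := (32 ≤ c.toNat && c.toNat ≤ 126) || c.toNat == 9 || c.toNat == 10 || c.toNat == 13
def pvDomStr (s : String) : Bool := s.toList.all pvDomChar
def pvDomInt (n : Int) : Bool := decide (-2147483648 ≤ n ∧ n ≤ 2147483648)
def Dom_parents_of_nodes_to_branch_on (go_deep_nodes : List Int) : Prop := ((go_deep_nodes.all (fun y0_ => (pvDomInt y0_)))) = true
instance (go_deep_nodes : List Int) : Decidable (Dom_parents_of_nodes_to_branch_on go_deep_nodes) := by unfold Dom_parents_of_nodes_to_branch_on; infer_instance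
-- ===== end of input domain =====

-- B builds the result in two passes (distinct parent keys first, then one filter per key)
-- instead of A's single scan appending into a dict; alternative decomposition, not faster.


-- ===== PORT A =====
-- int(node_/2): exact as PySem.Int.truncdiv on the domain (|n| ≤ 2^31 < 2^53).
def parents_of_nodes_to_branch_on (go_deep_nodes : List Int) : List (Int × List Int) :=
  (go_deep_nodes.foldl (fun d node_ =>
      if d.contains (PySem.Int.truncdiv node_ 2) = false then
        d.insert (PySem.Int.truncdiv node_ 2) [node_]
      else
        d.modify (PySem.Int.truncdiv node_ 2) [] (fun l => l ++ [node_]))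
    PySem.Dict.empty).items

-- ===== PORT B =====
def parents_of_nodes_to_branch_on_alt (go_deep_nodes : List Int) : List (Int × List Int) :=
  let keys := go_deep_nodes.foldl (fun ks n =>
      if PySem.Int.truncdiv n 2 ∈ ks then ks else ks ++ [PySem.Int.truncdiv n 2]) []
  keys.map (fun k => (k, go_deep_nodes.filter (fun n => PySem.Int.truncdiv n 2 == k)))

-- ===== PRECONDITION & SPEC =====
def Spec_parents_of_nodes_to_branch_on (go_deep_nodes : List Int) (out : List (Int × List Int)) : Prop := out = parents_of_nodes_to_branch_on_alt go_deep_nodes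
instance (go_deep_nodes : List Int) (out : List (Int × List Int)) : Decidable (Spec_parents_of_nodes_to_branch_on go_deep_nodes out) := by unfold Spec_parents_of_nodes_to_branch_on; infer_instance

-- ===== CLAIM =====
def Claim_equal_parents_of_nodes_to_branch_on : Prop := ∀ (go_deep_nodes : List Int), Dom_parents_of_nodes_to_branch_on go_deep_nodes → Spec_parents_of_nodes_to_branch_on go_deep_nodes (parents_of_nodes_to_branch_on go_deep_nodes)

-- ===== LEMMAS AND PROOFS =====

-- The loop invariant: starting A's dict-fold from a dict whose items are `ks.map (k, g k)`
-- (ks nodup) yields, as items, B's key list mapped over B's per-key filters.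
theorem pv_loop_invariant (xs : List Int) :
    ∀ (ks : List Int) (g : Int → List Int), ks.Nodup →
    (xs.foldl (fun d node_ =>
        if d.contains (PySem.Int.truncdiv node_ 2) = false then
          d.insert (PySem.Int.truncdiv node_ 2) [node_]
        else
          d.modify (PySem.Int.truncdiv node_ 2) [] (fun l => l ++ [node_]))
      (PySem.Dict.mk (ks.map (fun k => (k, g k))))).items
    = (xs.foldl (fun ks n =>
        if PySem.Int.truncdiv n 2 ∈ ks then ks else ks ++ [PySem.Int.truncdiv n 2]) ks).map
        (fun k => (k, (if k ∈ ks then g k else []) ++ xs.filter (fun n => PySem.Int.truncdiv n 2 == k))) := by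
  induction xs with
  | nil =>
    intro ks g _
    simp only [List.foldl_nil, List.filter_nil, List.append_nil]
    refine (List.map_congr_left (fun k hk => ?_)).symm
    simp [hk]
  | cons n t ih =>
    intro ks g hnd
    have hkeys : (PySem.Dict.mk (ks.map (fun k => (k, g k)))).contains (PySem.Int.truncdiv n 2)
        = decide (PySem.Int.truncdiv n 2 ∈ ks) := by
      simp [PySem.Dict.contains, Function.comp_def, List.any_beq']
    by_cases hk : (PySem.Int.truncdiv n 2) ∈ ks
    · -- key already present: A modifies the entry in place, B keeps its key list
      have hget : (PySem.Dict.mk (ks.map (fun k => (k, g k)))).getD (PySem.Int.truncdiv n 2) [] = g (PySem.Int.truncdiv n 2) := by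
        apply PySem.Dict.getD_of_mem_items
        · exact List.mem_map_of_mem hk
        · simpa [PySem.Dict.keys, Function.comp_def] using hnd
      have hmod : (PySem.Dict.mk (ks.map (fun k => (k, g k)))).modify (PySem.Int.truncdiv n 2)
            [] (fun l => l ++ [n])
          = PySem.Dict.mk (ks.map (fun k =>
              (k, if k = (PySem.Int.truncdiv n 2) then g k ++ [n] else g k))) := by
        apply PySem.Dict.ext
        simp only [PySem.Dict.modify, hget, PySem.Dict.insert, hkeys, hk, decide_true,
          List.map_map]
        refine List.map_congr_left (fun k _ => ?_)
        by_cases h : k = (PySem.Int.truncdiv n 2) <;> simp [h]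
      simp only [List.foldl_cons]
      rw [hkeys]
      simp only [hk, decide_true, Bool.true_eq_false, if_false, if_true, hmod]
      rw [ih ks _ hnd]
      refine List.map_congr_left (fun k _ => ?_)
      by_cases h : k = (PySem.Int.truncdiv n 2)
      · have hks : k ∈ ks := by rw [h]; exact hk
        subst h
        simp [hks, List.append_assoc]
      · have hne : ¬ (PySem.Int.truncdiv n 2 = k) := fun hh => h hh.symm
        by_cases hks : k ∈ ks <;> simp [hks, h, hne]
    · -- new key: A appends the entry, B appends the key
      have hmap : List.map (fun k => (k, if k = (PySem.Int.truncdiv n 2) then [n] else g k)) ks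
          = List.map (fun k => (k, g k)) ks :=
        List.map_congr_left (fun k hks => by rw [if_neg (fun h => hk (by rw [← h]; exact hks))])
      have hins : (PySem.Dict.mk (ks.map (fun k => (k, g k)))).insert (PySem.Int.truncdiv n 2) [n]
          = PySem.Dict.mk ((ks ++ [PySem.Int.truncdiv n 2]).map (fun k =>
              (k, if k = (PySem.Int.truncdiv n 2) then [n] else g k))) := by
        apply PySem.Dict.ext
        simp [PySem.Dict.insert, hkeys, hk, hmap]
      have hnd' : (ks ++ [PySem.Int.truncdiv n 2]).Nodup := by
        exact List.Nodup.append hnd (List.nodup_singleton _)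
          (by simpa [List.disjoint_singleton] using hk)
      simp only [List.foldl_cons]
      rw [hkeys]
      simp only [hk, decide_false, if_true, if_false, hins]
      rw [ih (ks ++ [PySem.Int.truncdiv n 2]) _ hnd']
      refine List.map_congr_left (fun k _ => ?_)
      by_cases h : k = (PySem.Int.truncdiv n 2)
      · subst h
        simp [hk]
      · have hne : ¬ (PySem.Int.truncdiv n 2 = k) := fun hh => h hh.symm
        by_cases hks : k ∈ ks <;> simp [hks, h, hne]

-- ===== VERDICT =====
theorem parents_of_nodes_to_branch_on_spec : Claim_equal_parents_of_nodes_to_branch_on := by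
  intro xs _
  unfold Spec_parents_of_nodes_to_branch_on
  unfold parents_of_nodes_to_branch_on parents_of_nodes_to_branch_on_alt
  have h := pv_loop_invariant xs [] (fun _ => []) List.nodup_nil
  simpa [PySem.Dict.empty] using h
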